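-- pv_equiv track=rewrite | github.com/Monti1811/GarminDungeonCrawler | tools/balance/auto_balance.py | distribute_attribute_points
-- ===== SOURCE A (Python) =====
-- from typing import Dict, List, Optional, Tuple
--
-- ATTRIBUTE_KEYS = ["strength", "constitution", "dexterity", "intelligence", "wisdom", "charisma", "luck"]
--
-- def distribute_attribute_points(base_attributes: Dict[str, int], points: int) -> Dict[str, int]:
--     if points <= 0:
--         return dict(base_attributes)
--     out = dict(base_attributes)
--     priority = sorted(ATTRIBUTE_KEYS, key=lambda key: base_attributes.get(key, 0), reverse=True)
--     if not priority:
--         return out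
--     for idx in range(points):
--         attr = priority[idx % len(priority)]
--         out[attr] = out.get(attr, 0) + 1
--     return out
-- ===== SOURCE B (Python) =====
-- ATTRIBUTE_KEYS = ["strength", "constitution", "dexterity", "intelligence", "wisdom", "charisma", "luck"]
--
-- def distribute_attribute_points(base_attributes, points):
--     out = dict(base_attributes)
--     if points <= 0:
--         return out
--     priority = sorted(ATTRIBUTE_KEYS, key=lambda key: base_attributes.get(key, 0), reverse=True)
--     q, r = divmod(points, len(priority))
--     for i, attr in enumerate(priority):
--         add = q + (1 if i < r else 0)
--         if add:
--             out[attr] = out.get(attr, 0) + add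
--     return out
-- ===== Notes on version B (the rewrite author's own statement) =====
-- stated objective: faster
-- what changed: A hands out one point per loop iteration round-robin over the priority-sorted attribute list (O(points) dict updates); B computes the closed form q, r = divmod(points, 7) and gives each priority attribute q points plus one extra to the first r, in a single 7-step loop.
import Mathlib
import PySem

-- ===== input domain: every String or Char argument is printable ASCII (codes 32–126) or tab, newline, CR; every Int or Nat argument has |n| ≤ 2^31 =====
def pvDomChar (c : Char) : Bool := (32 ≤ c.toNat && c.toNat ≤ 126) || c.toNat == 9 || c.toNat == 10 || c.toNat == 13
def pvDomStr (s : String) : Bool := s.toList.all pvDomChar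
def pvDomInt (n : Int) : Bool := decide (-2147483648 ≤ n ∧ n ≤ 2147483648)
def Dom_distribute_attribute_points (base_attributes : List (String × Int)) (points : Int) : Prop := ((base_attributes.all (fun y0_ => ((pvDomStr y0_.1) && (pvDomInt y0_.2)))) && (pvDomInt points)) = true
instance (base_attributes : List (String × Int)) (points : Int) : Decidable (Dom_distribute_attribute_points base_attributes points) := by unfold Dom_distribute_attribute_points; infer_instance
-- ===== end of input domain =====

-- B replaces A's point-by-point round-robin loop (O(points) dict updates) by the closed form
-- q = points // 7 to every priority attribute plus 1 to the first points % 7 of them (O(1) loop of 7 steps).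

-- ===== PORT A =====
def pvAttributeKeys : List String :=
  ["strength", "constitution", "dexterity", "intelligence", "wisdom", "charisma", "luck"]

def distribute_attribute_points (base_attributes : List (String × Int)) (points : Int) : List (String × Int) :=
  if points ≤ 0 then (PySem.Dict.ofList base_attributes).items
  else
    let out0 : PySem.Dict String Int := PySem.Dict.ofList base_attributes
    let priority := PySem.List.sorted pvAttributeKeys
      (fun k => (PySem.Dict.ofList base_attributes).getD k 0) true
    if priority.isEmpty then out0.items
    else
      ((PySem.List.pyRange 0 points).foldl
        (fun out idx =>
          -- priority[idx % len(priority)] — the index is provably in range, so pyGetD is exact here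
          let attr := PySem.List.pyGetD priority (PySem.Int.mod idx (priority.length : Int)) ""
          out.insert attr (out.getD attr 0 + 1)) out0).items

-- ===== PORT B =====
def distribute_attribute_points_alt (base_attributes : List (String × Int)) (points : Int) : List (String × Int) :=
  let out0 : PySem.Dict String Int := PySem.Dict.ofList base_attributes
  if points ≤ 0 then out0.items
  else
    let priority := PySem.List.sorted pvAttributeKeys
      (fun k => (PySem.Dict.ofList base_attributes).getD k 0) true
    let q := PySem.Int.floordiv points (priority.length : Int)
    let r := PySem.Int.mod points (priority.length : Int)
    (priority.zipIdx.foldl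
      (fun out p =>
        let add := q + (if (p.2 : Int) < r then 1 else 0)
        if add ≠ 0 then out.insert p.1 (out.getD p.1 0 + add) else out) out0).items

-- ===== PRECONDITION & SPEC =====
def Spec_distribute_attribute_points (base_attributes : List (String × Int)) (points : Int) (out : List (String × Int)) : Prop := out = distribute_attribute_points_alt base_attributes points
instance (base_attributes : List (String × Int)) (points : Int) (out : List (String × Int)) : Decidable (Spec_distribute_attribute_points base_attributes points out) := by unfold Spec_distribute_attribute_points; infer_instance

-- ===== CLAIM (what is proved, stated in full; the proofs are below) =====
def Claim_equal_distribute_attribute_points : Prop := ∀ (base_attributes : List (String × Int)) (points : Int), Dom_distribute_attribute_points base_attributes points → Spec_distribute_attribute_points base_attributes points (distribute_attribute_points base_attributes points)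

-- ===== LEMMAS AND PROOFS =====

-- A's single round-robin step: give one point to attribute a.
def pvStep (d : PySem.Dict String Int) (a : String) : PySem.Dict String Int :=
  d.insert a (d.getD a 0 + 1)

-- B's shape: walk the attribute list from index i, giving c j points to the attribute at index j.
def pvChain (c : Nat → Int) : PySem.Dict String Int → List String → Nat → PySem.Dict String Int
  | d, [], _ => d
  | d, a :: t, i =>
      pvChain c (if c i ≠ 0 then d.insert a (d.getD a 0 + c i) else d) t (i + 1)

-- the per-index point counts after n round-robin steps over a 7-element priority list
def pvCnt (n : Nat) (i : Nat) : Int :=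
  ((n / 7 : Nat) : Int) + (if i < n % 7 then 1 else 0)

theorem pvChain_congr {c c' : Nat → Int} :
    ∀ (t : List String) (i : Nat) (d : PySem.Dict String Int),
      (∀ j, i ≤ j → j < i + t.length → c' j = c j) ->
      pvChain c' d t i = pvChain c d t i := by
  intro t
  induction t with
  | nil => intro i d _; rfl
  | cons a t ih =>
      intro i d h
      simp only [pvChain]
      rw [h i (le_refl i) (by simp only [List.length_cons]; omega),
        ih (i + 1) _ (fun j h1 h2 => h j (by omega) (by simp only [List.length_cons]; omega))]

theorem pvChain_zero {c : Nat → Int} :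
    ∀ (t : List String) (i : Nat) (d : PySem.Dict String Int),
      (∀ j, i ≤ j → j < i + t.length → c j = 0) ->
      pvChain c d t i = d := by
  intro t
  induction t with
  | nil => intro i d _; rfl
  | cons a t ih =>
      intro i d h
      simp only [pvChain, h i (le_refl i) (by simp only [List.length_cons]; omega)]
      rw [if_neg (by simp)]
      exact ih (i + 1) d (fun j h1 h2 => h j (by omega) (by simp only [List.length_cons]; omega))

theorem pvChain_getD {a : String} :
    ∀ (t : List String) (i : Nat) (d : PySem.Dict String Int) (c : Nat → Int),
      a ∉ t → (pvChain c d t i).getD a 0 = d.getD a 0 := by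
  intro t
  induction t with
  | nil => intro i d c _; rfl
  | cons b t ih =>
      intro i d c ha
      simp only [List.mem_cons, not_or] at ha
      simp only [pvChain]
      rw [ih (i + 1) _ c ha.2]
      split
      · exact PySem.Dict.getD_insert_of_ne d _ 0 ha.1
      · rfl

-- two inserts at distinct keys commute (as items lists) when the first key is already present
theorem pvInsert_comm (d : PySem.Dict String Int) (a b : String) (v w : Int)
    (hab : a ≠ b) (ha : d.contains a = true) :
    (d.insert a v).insert b w = (d.insert b w).insert a v := by
  apply PySem.Dict.ext
  by_cases hb : d.contains b = true
  · rw [PySem.Dict.items_insert_of_contains _ w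
        (show (d.insert a v).contains b = true by
          rw [PySem.Dict.contains_insert]; simp [hb]),
      PySem.Dict.items_insert_of_contains _ v ha,
      PySem.Dict.items_insert_of_contains _ v
        (show (d.insert b w).contains a = true by
          rw [PySem.Dict.contains_insert]; simp [ha]),
      PySem.Dict.items_insert_of_contains _ w hb]
    simp only [List.map_map]
    apply List.map_congr_left
    intro p _
    simp only [Function.comp_apply]
    by_cases hpa : p.1 = a <;> by_cases hpb : p.1 = b
    · exact absurd (hpa.symm.trans hpb) hab
    · simp [hpa, hab]
    · simp [hpb, Ne.symm hab]
    · simp [hpa, hpb]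
  · have hb' : d.contains b = false := by rwa [Bool.not_eq_true] at hb
    rw [PySem.Dict.items_insert_of_not_contains _ w
        (show (d.insert a v).contains b = false by
          rw [PySem.Dict.contains_insert]; simp [hb', Ne.symm hab]),
      PySem.Dict.items_insert_of_contains _ v ha,
      PySem.Dict.items_insert_of_contains _ v
        (show (d.insert b w).contains a = true by
          rw [PySem.Dict.contains_insert]; simp [ha]),
      PySem.Dict.items_insert_of_not_contains _ w hb']
    simp [List.map_append, Ne.symm hab]

theorem pvChain_insert {a : String} (v : Int) :
    ∀ (t : List String) (i : Nat) (d : PySem.Dict String Int) (c : Nat → Int),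
      a ∉ t → d.contains a = true ->
      pvChain c (d.insert a v) t i = (pvChain c d t i).insert a v := by
  intro t
  induction t with
  | nil => intro i d c _ _; rfl
  | cons b t ih =>
      intro i d c ha hc
      simp only [List.mem_cons, not_or] at ha
      simp only [pvChain]
      split
      · rw [PySem.Dict.getD_insert_of_ne d v 0 (Ne.symm ha.1),
          pvInsert_comm d a b v _ ha.1 hc,
          ih (i + 1) _ c ha.2 (by rw [PySem.Dict.contains_insert]; simp [hc])]
      · exact ih (i + 1) d c ha.2 hc

-- splitting a chain walk at an append
theorem pvChain_append (c : Nat → Int) :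
    ∀ (xs ys : List String) (i : Nat) (d : PySem.Dict String Int),
      pvChain c d (xs ++ ys) i = pvChain c (pvChain c d xs i) ys (i + xs.length) := by
  intro xs
  induction xs with
  | nil => intro ys i d; simp [pvChain]
  | cons a t ih =>
      intro ys i d
      simp only [List.cons_append, pvChain, List.length_cons, ih]
      congr 1
      omega

-- the heart of the proof: one more round-robin step bumps the count of exactly one index
theorem pvCommute (L : List String) (hnd : L.Nodup) (k : Nat) (hk : k < L.length)
    (c c' : Nat → Int)
    (hc' : ∀ i, i < L.length → c' i = c i + if i = k then 1 else 0)
    (hnn : 0 ≤ c k)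
    (hmono : c k = 0 → ∀ j, k < j → c j = 0)
    (d : PySem.Dict String Int) :
    pvChain c' d L 0 = pvStep (pvChain c d L 0) L[k] := by
  set a := L[k] with ha
  have hsplit : L = L.take k ++ a :: L.drop (k + 1) := by
    nth_rewrite 1 [← List.take_append_drop k L]
    rw [List.drop_eq_getElem_cons hk]
  have hlen1 : (L.take k).length = k := by simp only [List.length_take]; omega
  have ha2 : a ∉ L.drop (k + 1) := by
    have hnd' : (L.take k ++ a :: L.drop (k + 1)).Nodup := hsplit ▸ hnd
    exact (List.nodup_cons.mp hnd'.of_append_right).1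
  have hld : (L.drop (k + 1)).length = L.length - (k + 1) := List.length_drop
  have hc2 : ∀ j, k + 1 ≤ j → j < (k + 1) + (L.drop (k + 1)).length → c' j = c j :=
    fun j h1 h2 => by rw [hc' j (by omega), if_neg (by omega)]; ring
  have hc1 : ∀ j, 0 ≤ j → j < 0 + (L.take k).length → c' j = c j :=
    fun j _ h2 => by rw [hc' j (by omega), if_neg (by omega)]; ring
  rw [hsplit, pvChain_append c', pvChain_append c]
  rw [pvChain_congr (c := c) (c' := c') (L.take k) 0 d hc1]
  simp only [hlen1, Nat.zero_add]
  simp only [pvChain]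
  have hck' : c' k = c k + 1 := by rw [hc' k hk, if_pos rfl]
  by_cases hck : c k = 0
  · have hz : ∀ j, k + 1 ≤ j → j < (k + 1) + (L.drop (k + 1)).length → c j = 0 :=
      fun j hj _ => hmono hck j (by omega)
    rw [hck', hck]
    rw [if_pos (show (0 : Int) + 1 ≠ 0 by norm_num),
      if_neg (show ¬ ((0 : Int) ≠ 0) by norm_num)]
    rw [pvChain_congr (c := c) (c' := c') (L.drop (k + 1)) (k + 1) _ hc2]
    rw [pvChain_zero (L.drop (k + 1)) (k + 1) _ hz,
      pvChain_zero (L.drop (k + 1)) (k + 1) _ hz]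
    simp [pvStep]
  · have hne1 : c k + 1 ≠ 0 := by omega
    rw [hck', if_pos hne1, if_pos hck]
    rw [pvChain_congr (c := c) (c' := c') (L.drop (k + 1)) (k + 1) _ hc2]
    set D := pvChain c d (L.take k) 0 with hD
    have hcont : (D.insert a (D.getD a 0 + c k)).contains a = true :=
      PySem.Dict.contains_insert_self D a _
    rw [show D.getD a 0 + (c k + 1) = D.getD a 0 + c k + 1 by ring]
    rw [← PySem.Dict.insert_insert_self D a (D.getD a 0 + c k) (D.getD a 0 + c k + 1)]
    rw [pvChain_insert (D.getD a 0 + c k + 1) (L.drop (k + 1)) (k + 1) _ c ha2 hcont]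
    unfold pvStep
    rw [pvChain_getD (L.drop (k + 1)) (k + 1) _ c ha2, PySem.Dict.getD_insert_self]

-- A's whole loop, in counted form
theorem pvLoopA (L : List String) (hnd : L.Nodup) (h7 : L.length = 7)
    (d : PySem.Dict String Int) :
    ∀ n : Nat,
      (List.range n).foldl
        (fun out j =>
          out.insert (PySem.List.pyGetD L (PySem.Int.mod (j : Int) (L.length : Int)) "")
            (out.getD (PySem.List.pyGetD L (PySem.Int.mod (j : Int) (L.length : Int)) "") 0 + 1)) d
        = pvChain (pvCnt n) d L 0 := by
  intro n
  induction n with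
  | zero =>
      rw [List.range_zero, List.foldl_nil, pvChain_zero]
      intro j _ _
      simp [pvCnt]
  | succ n ih =>
      rw [List.range_succ, List.foldl_append, List.foldl_cons, List.foldl_nil, ih]
      have hk : n % 7 < L.length := by omega
      have hattr : PySem.List.pyGetD L (PySem.Int.mod ((n : Nat) : Int) (L.length : Int)) ""
          = L[n % 7] := by
        rw [h7, PySem.Int.mod_natCast n 7, PySem.List.pyGetD_natCast,
          List.getD_eq_getElem L "" (by omega)]
      rw [hattr]
      rw [pvCommute L hnd (n % 7) hk (pvCnt n) (pvCnt (n + 1))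
        (fun i hi => by unfold pvCnt; rw [h7] at hi; split_ifs <;> omega)
        (by unfold pvCnt; split_ifs <;> omega)
        (fun h j hj => by unfold pvCnt at h ⊢; split_ifs at h ⊢ <;> omega)
        d]
      rfl

-- B's loop over enumerate(priority) is a chain walk
theorem pvZipB (q r : Int) :
    ∀ (t : List String) (i : Nat) (d : PySem.Dict String Int),
      (t.zipIdx i).foldl
        (fun out p =>
          if (q + (if ((p.2 : Int) < r) then 1 else 0)) ≠ 0 then
            out.insert p.1 (out.getD p.1 0 + (q + (if ((p.2 : Int) < r) then 1 else 0)))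
          else out) d
        = pvChain (fun m => q + (if ((m : Int) < r) then 1 else 0)) d t i := by
  intro t
  induction t with
  | nil => intro i d; rfl
  | cons a t ih =>
      intro i d
      rw [List.zipIdx_cons, List.foldl_cons, ih]
      rfl

-- ===== VERDICT (by name: the statement is the Claim_ definition above) =====
theorem distribute_attribute_points_spec : Claim_equal_distribute_attribute_points := by
  intro base points _
  unfold Spec_distribute_attribute_points distribute_attribute_points distribute_attribute_points_alt
  by_cases hp : points ≤ 0
  · simp only [if_pos hp]
  · simp only [if_neg hp]
    have hperm := PySem.List.sorted_perm pvAttributeKeys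
      (fun k => (PySem.Dict.ofList base).getD k 0) true
    set P := PySem.List.sorted pvAttributeKeys
      (fun k => (PySem.Dict.ofList base).getD k 0) true with hPdef
    have h7 : P.length = 7 := hperm.length_eq
    have hnd : P.Nodup := hperm.nodup_iff.mpr (by decide)
    have hne : ¬ (P.isEmpty = true) := by
      simp only [List.isEmpty_iff]
      intro h
      rw [h] at h7
      simp at h7
    rw [if_neg hne]
    set n := points.toNat with hn
    have hpts : points = (n : Int) := by omega
    rw [hpts, PySem.List.pyRange_zero_natCast, List.foldl_map]
    congr 1
    rw [pvLoopA P hnd h7 (PySem.Dict.ofList base) n]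
    rw [pvZipB (PySem.Int.floordiv (n : Int) (P.length : Int))
      (PySem.Int.mod (n : Int) (P.length : Int)) P 0 (PySem.Dict.ofList base)]
    exact (pvChain_congr P 0 (PySem.Dict.ofList base)
      (fun j _ _ => by
        rw [h7, PySem.Int.floordiv_natCast n 7, PySem.Int.mod_natCast n 7]
        unfold pvCnt
        congr 1
        split_ifs <;> omega)).symm
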